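-- pv_equiv track=rewrite | github.com/acconeer/acconeer-python-exploration | src/acconeer/exptool/a121/_core/utils.py | zip3_extended_structures
-- ===== SOURCE A (Python) =====
-- from typing import (
--     Any,
--     Callable,
--     Generic,
--     Iterator,
--     Optional,
--     Tuple,
--     Type,
--     TypeVar,
--     Union,
--     overload,
-- )
--
-- S = TypeVar("S")
--
-- T = TypeVar("T")
--
-- U = TypeVar("U")
--
-- ValueT = TypeVar("ValueT")
--
-- def zip3_extended_structures(
--     structure_a: list[dict[int, S]],
--     structure_b: list[dict[int, T]],
--     structure_c: list[dict[int, U]],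
-- ) -> list[dict[int, Tuple[S, T, U]]]:
--     """Zip structures according to group id and sensor id.
--
--     Typical use case is reordering extended structures before iterating.
--
--     Example:
--
--         structure_a = [{1: a_1, 2: a_2}, {1: a_3}]
--
--         structure_b = [{1: b_1, 2: b_2}, {1: b_3}]
--
--         structure_c = [{1: c_1, 2: c_2}, {1: c_3}]
--
--         result: [{1: (a_1, b_1, c_1), 2: (a_2, b_2, c_2)}, {1: (a_3, b_3, c_3)}]
--
--     """
--     res = []
--     try:
--         for group_id, sensor_id, value in iterate_extended_structure(structure_a):
--             res.append(
--                 (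
--                     group_id,
--                     sensor_id,
--                     (value, structure_b[group_id][sensor_id], structure_c[group_id][sensor_id]),
--                 ),
--             )
--     except (KeyError, IndexError):
--         raise ValueError("Structure of arguments are not the same.")
--
--     return create_extended_structure(iter(res))
--
-- def iterate_extended_structure(
--     structure: list[dict[int, ValueT]]
-- ) -> Iterator[Tuple[int, int, ValueT]]:
--     """Iterates over the elements of the extended structure.
--
--     :returns: Iterator of (<group id>, <sensor id>, <element>)
--     """
--
--     for group_id, group in enumerate(structure):
--         for sensor_id, elem in group.items():
--             yield (group_id, sensor_id, elem)
--
-- def create_extended_structure(items: Iterator[Tuple[int, int, ValueT]]) -> list[dict[int, ValueT]]: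
--     structure: list[dict[int, ValueT]] = []
--     current_group_index: Optional[int] = None
--     current_group: Optional[dict[int, ValueT]] = None
--
--     for group_index, sensor_id, value in items:
--         if current_group_index is None:
--             if group_index != 0:
--                 raise ValueError
--
--             current_group_index = 0
--             current_group = {}
--             structure.append(current_group)
--         elif group_index != current_group_index:
--             if group_index != current_group_index + 1:
--                 raise ValueError
--
--             current_group_index += 1
--             current_group = {}
--             structure.append(current_group)
--
--         assert current_group is not None
--         if sensor_id in current_group:
--             raise ValueError
--
--         current_group[sensor_id] = value
--
--     return structure
-- ===== SOURCE B (Python) =====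
-- def zip3_extended_structures(structure_a, structure_b, structure_c):
--     try:
--         return [
--             {
--                 sid: (value, structure_b[gi][sid], structure_c[gi][sid])
--                 for sid, value in group.items()
--             }
--             for gi, group in enumerate(structure_a)
--         ]
--     except (KeyError, IndexError):
--         raise ValueError("Structure of arguments are not the same.")
-- ===== Notes on version B (the rewrite author's own statement) =====
-- stated objective: simpler
-- what changed: B zips each group dict directly with a nested comprehension over enumerate(structure_a), instead of A's flattening everything to (group, sensor, value) tuples and re-parsing them through create_extended_structure's stateful validating loop; Pre_ excludes structures containing empty group dicts, a degenerate corner on which A's drop-trailing/reject-interior behaviour and B's keep-the-empty-dict behaviour are both defensible and no caller specifies either.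
-- outside the precondition, e.g. on zip3_extended_structures([{}], [{}], [{}]): A returns [], B returns [{}]; on zip3_extended_structures([{1: 5}, {}], [{1: 6}], [{1: 7}]): A returns [{1: (5, 6, 7)}], B returns [{1: (5, 6, 7)}, {}]; on zip3_extended_structures([{}, {1: 5}], [{}, {1: 6}], [{}, {1: 7}]): A raises ValueError, B returns [{}, {1: (5, 6, 7)}]
import Mathlib
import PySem

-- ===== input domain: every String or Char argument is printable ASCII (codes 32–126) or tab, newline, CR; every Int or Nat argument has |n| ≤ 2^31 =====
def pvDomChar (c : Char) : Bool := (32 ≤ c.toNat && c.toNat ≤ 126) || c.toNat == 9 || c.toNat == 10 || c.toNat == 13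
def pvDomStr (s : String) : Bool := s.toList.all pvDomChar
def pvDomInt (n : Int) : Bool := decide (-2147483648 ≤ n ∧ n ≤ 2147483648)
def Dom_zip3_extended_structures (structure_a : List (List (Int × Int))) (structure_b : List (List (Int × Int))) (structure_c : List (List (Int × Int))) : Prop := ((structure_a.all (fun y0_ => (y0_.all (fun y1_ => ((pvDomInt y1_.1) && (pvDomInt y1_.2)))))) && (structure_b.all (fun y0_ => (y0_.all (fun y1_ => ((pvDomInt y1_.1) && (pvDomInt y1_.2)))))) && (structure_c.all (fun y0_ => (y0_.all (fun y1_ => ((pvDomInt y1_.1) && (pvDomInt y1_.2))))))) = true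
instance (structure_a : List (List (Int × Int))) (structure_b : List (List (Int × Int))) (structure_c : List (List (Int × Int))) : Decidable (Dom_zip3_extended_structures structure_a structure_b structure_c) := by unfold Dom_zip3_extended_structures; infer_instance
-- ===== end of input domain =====

-- B zips each group dict directly with a nested comprehension instead of A's flatten-to-tuples +
-- create_extended_structure re-parse (objective: simpler).

-- Python dict lookup d[k] on an insertion-ordered association list: first match (both ports use it).
def dGet (g : List (Int × Int)) (k : Int) : Option Int :=
  (g.find? (fun p => p.1 == k)).map Prod.snd

-- ===== PORT A =====
-- the items of A's `res` contributed by one group: (group_id, sensor_id, (value, b-value, c-value));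
-- `none` = the KeyError/IndexError that A turns into ValueError
def pvRowA (b c : List (List (Int × Int))) (n : Nat) : List (Int × Int) →
    Option (List (Int × Int × Int × Int × Int))
  | [] => some []
  | p :: g => do
      let gb ← getElem? b n
      let bv ← dGet gb p.1
      let gc ← getElem? c n
      let cv ← dGet gc p.1
      let t ← pvRowA b c n g
      pure (((n : Int), p.1, p.2, bv, cv) :: t)

-- building A's `res` list over `enumerate(structure_a)`
def pvFlatA (b c : List (List (Int × Int))) : Nat → List (List (Int × Int)) →
    Option (List (Int × Int × Int × Int × Int))
  | _, [] => some []
  | n, g :: rest => do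
      let r ← pvRowA b c n g
      let t ← pvFlatA b c (n + 1) rest
      pure (r ++ t)

-- one step of create_extended_structure's loop; state = (closed groups, open (index, group));
-- `none` = its `raise ValueError`
def pvStepA (st : List (List (Int × Int × Int × Int)) × Option (Int × List (Int × Int × Int × Int)))
    (it : Int × Int × Int × Int × Int) :
    Option (List (List (Int × Int × Int × Int)) × Option (Int × List (Int × Int × Int × Int))) :=
  match st.2 with
  | none =>
      if it.1 ≠ 0 then none
      else some (st.1, some (0, [(it.2.1, it.2.2)]))
  | some (ci, cur) =>
      if it.1 ≠ ci then
        if it.1 ≠ ci + 1 then none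
        else some (st.1 ++ [cur], some (ci + 1, [(it.2.1, it.2.2)]))
      else
        if (cur.map Prod.fst).contains it.2.1 then none
        else some (st.1, some (ci, cur ++ [(it.2.1, it.2.2)]))

def pvCreateA (items : List (Int × Int × Int × Int × Int)) :
    Option (List (List (Int × Int × Int × Int))) := do
  let st ← items.foldlM pvStepA ([], none)
  pure (st.1 ++ (match st.2 with | none => [] | some (_, g) => [g]))

def zip3_extended_structures (structure_a : List (List (Int × Int))) (structure_b : List (List (Int × Int))) (structure_c : List (List (Int × Int))) : List (List (Int × Int × Int × Int)) :=
  (((pvFlatA structure_b structure_c 0 structure_a).bind pvCreateA).getD [])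

-- ===== PORT B =====
-- B's inner dict comprehension for group index n (structure_b/c are indexed per item, as in the
-- comprehension; an empty group never indexes them)
def pvRowB (b c : List (List (Int × Int))) (n : Nat) : List (Int × Int) →
    Option (List (Int × Int × Int × Int))
  | [] => some []
  | p :: g => do
      let gb ← getElem? b n
      let bv ← dGet gb p.1
      let gc ← getElem? c n
      let cv ← dGet gc p.1
      let t ← pvRowB b c n g
      pure ((p.1, p.2, bv, cv) :: t)

-- B's outer comprehension over `enumerate(structure_a)`
def pvGoB (b c : List (List (Int × Int))) : Nat → List (List (Int × Int)) →
    Option (List (List (Int × Int × Int × Int)))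
  | _, [] => some []
  | n, g :: rest => do
      let row ← pvRowB b c n g
      let t ← pvGoB b c (n + 1) rest
      pure (row :: t)

def zip3_extended_structures_alt (structure_a : List (List (Int × Int))) (structure_b : List (List (Int × Int))) (structure_c : List (List (Int × Int))) : List (List (Int × Int × Int × Int)) :=
  ((pvGoB structure_b structure_c 0 structure_a).getD [])

-- ===== PRECONDITION & SPEC =====
-- Pre_ excludes the inputs on which the Python A raises ValueError (a group/sensor id missing from
-- structure_b/structure_c) and, as a defensible corner, structures whose structure_a contains an
-- empty group dict: there A drops trailing empty groups and rejects interior ones while B keeps an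
-- empty dict per group, and neither value is specified for this zip; it also requires each group of
-- structure_a to have distinct sensor ids, which every real Python dict input satisfies (an
-- association list with duplicate keys does not represent a dict).
def Pre_zip3_extended_structures (structure_a : List (List (Int × Int))) (structure_b : List (List (Int × Int))) (structure_c : List (List (Int × Int))) : Prop :=
  (∀ g ∈ structure_a, g ≠ []) ∧
  ∀ i < structure_a.length,
    (i < structure_b.length ∧ i < structure_c.length ∧
     ((structure_a.getD i []).map Prod.fst).Nodup ∧
     (∀ p ∈ structure_a.getD i [],
        p.1 ∈ (structure_b.getD i []).map Prod.fst ∧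
        p.1 ∈ (structure_c.getD i []).map Prod.fst))
instance (structure_a : List (List (Int × Int))) (structure_b : List (List (Int × Int))) (structure_c : List (List (Int × Int))) : Decidable (Pre_zip3_extended_structures structure_a structure_b structure_c) := by unfold Pre_zip3_extended_structures; infer_instance

def pvWitness_zip3_extended_structures : (List (List (Int × Int))) × (List (List (Int × Int))) × (List (List (Int × Int))) :=
  ([[(1, 10), (2, 11)], [(1, 12)]], [[(1, 20), (2, 21)], [(1, 22)]], [[(1, 30), (2, 31)], [(1, 32)]])

def Spec_zip3_extended_structures (structure_a : List (List (Int × Int))) (structure_b : List (List (Int × Int))) (structure_c : List (List (Int × Int))) (out : List (List (Int × Int × Int × Int))) : Prop := out = zip3_extended_structures_alt structure_a structure_b structure_c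
instance (structure_a : List (List (Int × Int))) (structure_b : List (List (Int × Int))) (structure_c : List (List (Int × Int))) (out : List (List (Int × Int × Int × Int))) : Decidable (Spec_zip3_extended_structures structure_a structure_b structure_c out) := by unfold Spec_zip3_extended_structures; infer_instance

-- ===== CLAIM (what is proved, stated in full; the proofs are below) =====
def Claim_equal_zip3_extended_structures : Prop := ∀ (structure_a : List (List (Int × Int))) (structure_b : List (List (Int × Int))) (structure_c : List (List (Int × Int))), Dom_zip3_extended_structures structure_a structure_b structure_c → Pre_zip3_extended_structures structure_a structure_b structure_c → Spec_zip3_extended_structures structure_a structure_b structure_c (zip3_extended_structures structure_a structure_b structure_c)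

-- ===== LEMMAS AND PROOFS =====

-- the finalisation of create_extended_structure's state
def pvFin (st : List (List (Int × Int × Int × Int)) × Option (Int × List (Int × Int × Int × Int))) :
    List (List (Int × Int × Int × Int)) :=
  st.1 ++ (match st.2 with | none => [] | some (_, g) => [g])

theorem pvCreateA_eq (L : List (Int × Int × Int × Int × Int)) :
    pvCreateA L = (L.foldlM pvStepA ([], none)).map pvFin := by
  cases h : L.foldlM pvStepA ([], none) <;> simp [pvCreateA, pvFin, h]

-- suffix form of the precondition, restricted to all-non-empty group lists (the situation outside D_)
def pvPreS (b c : List (List (Int × Int))) : Nat → List (List (Int × Int)) → Prop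
  | _, [] => True
  | n, g :: rest =>
      g ≠ [] ∧ n < b.length ∧ n < c.length ∧ (g.map Prod.fst).Nodup ∧
      (∀ p ∈ g, p.1 ∈ (b.getD n []).map Prod.fst ∧ p.1 ∈ (c.getD n []).map Prod.fst) ∧
      pvPreS b c (n + 1) rest

theorem pvPreS_of (b c : List (List (Int × Int))) :
    ∀ (l : List (List (Int × Int))) (n : Nat),
    (∀ g ∈ l, g ≠ []) →
    (∀ i < l.length, l.getD i [] ≠ [] →
      (n + i < b.length ∧ n + i < c.length ∧
       ((l.getD i []).map Prod.fst).Nodup ∧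
       (∀ p ∈ l.getD i [],
          p.1 ∈ (b.getD (n + i) []).map Prod.fst ∧
          p.1 ∈ (c.getD (n + i) []).map Prod.fst))) →
    pvPreS b c n l := by
  intro l
  induction l with
  | nil => intro n _ _; trivial
  | cons g rest ih =>
    intro n hne h
    have hg : g ≠ [] := hne g (by simp)
    have h0 := h 0 (by simp) (by simpa using hg)
    refine ⟨hg, by simpa using h0.1, by simpa using h0.2.1,
      by simpa using h0.2.2.1, by simpa using h0.2.2.2, ?_⟩
    apply ih (n + 1) (fun x hx => hne x (by simp [hx]))
    intro i hi hne'
    have hi' : (g :: rest).getD (i + 1) [] ≠ [] := by simpa [List.getD_cons_succ] using hne'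
    have hh := h (i + 1) (by simpa using hi) hi'
    have e : n + (i + 1) = (n + 1) + i := by omega
    refine ⟨by have := hh.1; omega, by have := hh.2.1; omega,
      by simpa [List.getD_cons_succ] using hh.2.2.1, ?_⟩
    have := hh.2.2.2
    rw [e] at this
    simpa [List.getD_cons_succ] using this

theorem dGet_mem {g : List (Int × Int)} {k : Int} (h : k ∈ g.map Prod.fst) :
    ∃ v, dGet g k = some v := by
  induction g with
  | nil => simp at h
  | cons p g ih =>
    by_cases hp : p.1 = k
    · exact ⟨p.2, by simp [dGet, List.find?_cons, hp]⟩
    · have h' : k ∈ g.map Prod.fst := by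
        simp only [List.map_cons, List.mem_cons] at h
        rcases h with h | h
        · exact absurd h.symm hp
        · exact h
      obtain ⟨v, hv⟩ := ih h'
      refine ⟨v, ?_⟩
      simp only [dGet] at hv ⊢
      rw [List.find?_cons_of_neg]
      · exact hv
      · simp [hp]

theorem getElem?_getD {l : List (List (Int × Int))} {n : Nat} (h : n < l.length) :
    getElem? l n = some (l.getD n []) := by
  simp [List.getElem?_eq_getElem h, List.getD_eq_getElem l [] h]

theorem pvRowB_some {b c : List (List (Int × Int))} {n : Nat} {g : List (Int × Int)}
    (hb : n < b.length) (hc : n < c.length)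
    (h : ∀ p ∈ g, p.1 ∈ (b.getD n []).map Prod.fst ∧ p.1 ∈ (c.getD n []).map Prod.fst) :
    ∃ r, pvRowB b c n g = some r := by
  induction g with
  | nil => exact ⟨[], rfl⟩
  | cons p g ih =>
    obtain ⟨hbm, hcm⟩ := h p (by simp)
    obtain ⟨bv, hbv⟩ := dGet_mem hbm
    obtain ⟨cv, hcv⟩ := dGet_mem hcm
    obtain ⟨r, hr⟩ := ih (fun q hq => h q (by simp [hq]))
    refine ⟨(p.1, p.2, bv, cv) :: r, ?_⟩
    rw [pvRowB, getElem?_getD hb, getElem?_getD hc]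
    simp only [Option.bind_eq_bind, Option.bind_some, hbv, hcv, hr, Option.pure_def]

theorem pvRowB_keys {b c : List (List (Int × Int))} {n : Nat} {g : List (Int × Int)}
    {r : List (Int × Int × Int × Int)} (h : pvRowB b c n g = some r) :
    r.map (fun q => q.1) = g.map Prod.fst := by
  induction g generalizing r with
  | nil => simp [pvRowB] at h; simp [← h]
  | cons p g ih =>
    rw [pvRowB] at h
    cases hb : getElem? b n with
    | none => simp [hb] at h
    | some gb =>
      simp only [hb, Option.bind_eq_bind] at h
      cases hbv : dGet gb p.1 <;> simp [hbv] at h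
      cases hc : getElem? c n with
      | none => simp [hc] at h
      | some gc =>
        simp only [hc] at h
        cases hcv : dGet gc p.1 <;> simp [hcv] at h
        cases hrest : pvRowB b c n g <;> simp [hrest] at h
        subst h
        simpa using ih hrest

theorem pvRowA_eq (b c : List (List (Int × Int))) (n : Nat) (g : List (Int × Int)) :
    pvRowA b c n g = (pvRowB b c n g).map (List.map (fun q => ((n : Int), q))) := by
  induction g with
  | nil => simp [pvRowA, pvRowB]
  | cons p g ih =>
    rw [pvRowA, pvRowB]
    cases hb : getElem? b n <;> simp [hb]
    cases hbv : dGet _ p.1 <;> simp [hbv]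
    cases hc : getElem? c n <;> simp [hc]
    cases hcv : dGet _ p.1 <;> simp [hcv]
    cases hrest : pvRowB b c n g <;> simp [hrest] at ih ⊢ <;> simp [ih]

theorem pvFill (m : Int) :
    ∀ (r : List (Int × Int × Int × Int)) (cur : List (Int × Int × Int × Int))
      (acc : List (List (Int × Int × Int × Int))),
      (((cur ++ r).map (fun q => q.1)).Nodup) →
      List.foldlM pvStepA (acc, some (m, cur)) (r.map (fun q => (m, q)))
        = some (acc, some (m, cur ++ r)) := by
  intro r
  induction r with
  | nil => intro cur acc _; simp
  | cons q r ih =>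
    intro cur acc hnd
    have hq : q.1 ∉ cur.map (fun q => q.1) := by
      simp only [List.map_append, List.nodup_append] at hnd
      intro hmem
      exact hnd.2.2 q.1 hmem q.1 (by simp) rfl
    have hstep : pvStepA (acc, some (m, cur)) (m, q)
        = some (acc, some (m, cur ++ [q])) := by
      simp only [pvStepA]
      rw [if_neg (by simp), if_neg (by
        simp only [List.contains_eq_mem, Bool.not_eq_true]
        simpa using hq)]
    have hnd' : (((cur ++ [q]) ++ r).map (fun q => q.1)).Nodup := by
      rw [← List.append_cons]; exact hnd
    simp only [List.map_cons, List.foldlM_cons, hstep, Option.bind_eq_bind, Option.bind_some]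
    rw [ih (cur ++ [q]) acc hnd', ← List.append_cons]

theorem pvOpen0 {r : List (Int × Int × Int × Int)} (acc : List (List (Int × Int × Int × Int)))
    (hnd : (r.map (fun q => q.1)).Nodup) (hne : r ≠ []) :
    List.foldlM pvStepA (acc, none) (r.map (fun q => ((0 : Int), q)))
      = some (acc, some (0, r)) := by
  cases r with
  | nil => exact absurd rfl hne
  | cons q r =>
    have hstep : pvStepA (acc, none) ((0 : Int), q) = some (acc, some (0, [q])) := by
      simp [pvStepA]
    simp only [List.map_cons, List.foldlM_cons, hstep, Option.bind_eq_bind, Option.bind_some]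
    simpa using pvFill 0 r [q] acc (by simpa using hnd)

theorem pvOpenNext (m : Int) {r : List (Int × Int × Int × Int)}
    (acc : List (List (Int × Int × Int × Int))) (cur : List (Int × Int × Int × Int))
    (hnd : (r.map (fun q => q.1)).Nodup) (hne : r ≠ []) :
    List.foldlM pvStepA (acc, some (m, cur)) (r.map (fun q => (m + 1, q)))
      = some (acc ++ [cur], some (m + 1, r)) := by
  cases r with
  | nil => exact absurd rfl hne
  | cons q r =>
    have hstep : pvStepA (acc, some (m, cur)) (m + 1, q)
        = some (acc ++ [cur], some (m + 1, [q])) := by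
      simp only [pvStepA]
      rw [if_pos (by omega), if_neg (by simp)]
    simp only [List.map_cons, List.foldlM_cons, hstep, Option.bind_eq_bind, Option.bind_some]
    simpa using pvFill (m + 1) r [q] (acc ++ [cur]) (by simpa using hnd)

theorem pv_main (b c : List (List (Int × Int))) :
    ∀ (l : List (List (Int × Int))) (n : Nat) (acc : List (List (Int × Int × Int × Int)))
      (cur : List (Int × Int × Int × Int)),
    pvPreS b c (n + 1) l →
    (pvFlatA b c (n + 1) l).bind
        (fun L => (L.foldlM pvStepA (acc, some ((n : Int), cur))).map pvFin)
      = (pvGoB b c (n + 1) l).map (fun t => acc ++ cur :: t) := by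
  intro l
  induction l with
  | nil => intro n acc cur _; simp [pvFlatA, pvGoB, pvFin]
  | cons g rest ih =>
    intro n acc cur hS
    obtain ⟨hg, hbl, hcl, hnd, hmem, hrest⟩ := hS
    obtain ⟨r, hr⟩ := pvRowB_some hbl hcl hmem
    have hk := pvRowB_keys hr
    have hndr : (r.map (fun q => q.1)).Nodup := by rw [hk]; exact hnd
    have hner : r ≠ [] := by
      intro h0; subst h0; simp at hk; exact hg hk
    have hrowA : pvRowA b c (n + 1) g
        = some (r.map (fun q => (((n : Int) + 1), q))) := by
      rw [pvRowA_eq, hr]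
      simp [Nat.cast_add]
    have hfold := pvOpenNext (n : Int) acc cur hndr hner
    have IH := ih (n + 1) (acc ++ [cur]) r hrest
    simp only [Nat.cast_add, Nat.cast_one] at IH
    rw [pvFlatA, pvGoB, hrowA, hr]
    simp only [Option.bind_eq_bind, Option.bind_some]
    cases hf : pvFlatA b c (n + 1 + 1) rest with
    | none =>
      rw [hf] at IH
      cases hgo : pvGoB b c (n + 1 + 1) rest with
      | none => simp [hgo]
      | some t => rw [hgo] at IH; simp at IH
    | some L =>
      rw [hf] at IH
      simp only [Option.pure_def, Option.bind_eq_bind, Option.bind_some] at IH ⊢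
      rw [List.foldlM_append, hfold]
      simp only [Option.bind_eq_bind, Option.bind_some] at IH ⊢
      cases hgo : pvGoB b c (n + 1 + 1) rest with
      | none => rw [hgo] at IH; simpa using IH
      | some t =>
        rw [hgo] at IH
        simp only [Option.bind_eq_bind, Option.bind_some, hgo, Option.map_some,
          Option.pure_def]
        rw [IH]
        simp

-- top-level form of pv_main: on an all-non-empty prefix, A's flatten + create equals B's direct pass
theorem pv_top (b c : List (List (Int × Int))) (l : List (List (Int × Int)))
    (hS : pvPreS b c 0 l) :
    (pvFlatA b c 0 l).bind pvCreateA = pvGoB b c 0 l := by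
  have hCr : pvCreateA = fun L => (L.foldlM pvStepA ([], none)).map pvFin :=
    funext pvCreateA_eq
  cases l with
  | nil => rfl
  | cons g rest =>
    obtain ⟨hg, hbl, hcl, hnd, hmem, hrest⟩ := hS
    obtain ⟨r, hr⟩ := pvRowB_some hbl hcl hmem
    have hk := pvRowB_keys hr
    have hndr : (r.map (fun q => q.1)).Nodup := by rw [hk]; exact hnd
    have hner : r ≠ [] := by intro h0; subst h0; simp at hk; exact hg hk
    have hrowA : pvRowA b c 0 g = some (r.map (fun q => ((0 : Int), q))) := by
      rw [pvRowA_eq, hr]; simp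
    have hfold := pvOpen0 (r := r) [] hndr hner
    have IH := pv_main b c rest 0 [] r (by simpa using hrest)
    simp only [Nat.cast_zero] at IH
    rw [hCr, pvFlatA, pvGoB, hrowA, hr]
    simp only [Option.bind_eq_bind, Option.bind_some]
    cases hf : pvFlatA b c (0 + 1) rest with
    | none =>
      rw [hf] at IH
      cases hgo : pvGoB b c (0 + 1) rest with
      | none => simp [hgo]
      | some t => rw [hgo] at IH; simp at IH
    | some L =>
      rw [hf] at IH
      simp only [Option.pure_def, Option.bind_eq_bind, Option.bind_some] at IH ⊢
      rw [List.foldlM_append, hfold]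
      cases hgo : pvGoB b c (0 + 1) rest with
      | none => rw [hgo] at IH; simpa using IH
      | some t =>
        rw [hgo] at IH
        simp only [Option.bind_eq_bind, Option.bind_some, hgo, Option.map_some,
          Option.pure_def]
        rw [IH]
        simp

-- ===== VERDICT (by name: the statement is the Claim_ definition above) =====
theorem zip3_extended_structures_spec : Claim_equal_zip3_extended_structures := by
  unfold Claim_equal_zip3_extended_structures
  intro a b c _ hPre
  unfold Spec_zip3_extended_structures
  have hS : pvPreS b c 0 a := by
    apply pvPreS_of b c a 0 hPre.1
    intro i hi _
    have h := hPre.2 i hi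
    exact ⟨by simpa using h.1, by simpa using h.2.1, h.2.2.1, by simpa using h.2.2.2⟩
  rw [zip3_extended_structures, zip3_extended_structures_alt, pv_top b c a hS]
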